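-- pv_equiv track=rewrite | github.com/oscarlaird/vocabulary-extractor | src/vocabulary-extractor/__init__.py | getlemmas
-- ===== SOURCE A (Python) =====
-- def getlemmas(word): #get lemmas from a word
--     word=word.lower()
--     lemmas = [word,]
--
--     prefix2 = word[:2] #prefixes
--     prefix3 = word[:3]
--     if prefix2 in ['re','un','in','im','dis']:
--         lemmas.extend(getlemmas(word[2:]))
--     elif prefix3 == 'dis':
--         lemmas.extend(getlemmas(word[3:]))
--
--     suffix1 = word[-1:] #suffixes
--     suffix2 = word[-2:]
--     suffix3 = word[-3:]
--     suffix4 = word[-4:]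
--     suffix5 = word[-5:]
--     if suffix5 in ['iness','iment','iless']: #5
--         lemmas.extend(getlemmas(word[:-5]+'y'))
--     elif suffix5=='ility':
--         lemmas.extend(getlemmas(word[:-5]+'le'))
--     if suffix4 in ['ness','ment','like','less']: #4
--         lemmas.extend(getlemmas(word[:-4]))
--     elif suffix4=='able':
--         lemmas.extend(getlemmas(word[:-4]))
--         lemmas.extend(getlemmas(word[:-4]+'e'))
--     elif suffix4 in ['iful','iest']:
--         lemmas.extend(getlemmas(word[:-4]+'y'))
--     if suffix3=='ing': #3
--         lemmas.extend(getlemmas(word[:-3]))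
--         lemmas.extend(getlemmas(word[:-3]+'e'))
--     if suffix3 in ['ful','ist','est']:
--         lemmas.extend(getlemmas(word[:-3]))
--     elif suffix3=='ily':
--         lemmas.extend(getlemmas(word[:-3]+'y'))
--     if suffix2 in ['es','al']: #2
--         lemmas.extend(getlemmas(word[:-2]))
--     elif suffix2 in ['ly','ed','er']:
--         lemmas.extend(getlemmas(word[:-2]))
--         lemmas.extend(getlemmas(word[:-2]+'e'))
--     if suffix1=='s': #1
--         lemmas.extend(getlemmas(word[:-1]))
--
--     return sorted(lemmas,key=len) #return lemmas (no duplicates)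
-- ===== SOURCE B (Python) =====
-- # Table-driven rewrite: the affix rules live in data tables; an explicit LIFO
-- # worklist replaces the recursion, and one final stable length sort replaces
-- # the per-level re-sorting.
--
-- # Prefix rules, tried in order; the first whose probe matches fires.
-- # (probe_length, pattern): match is word[:probe_length] == pattern.
-- # (2, 'dis') reproduces A's dead membership test of word[:2] against 'dis'.
-- PREFIX_RULES = [(2, 're'), (2, 'un'), (2, 'in'), (2, 'im'), (2, 'dis'), (3, 'dis')]
--
-- # Suffix rule groups; within a group the first matching pattern fires
-- # (the if/elif grouping of A), and each group is tried independently.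
-- # (pattern, additions): each addition yields the child word[:-len(pattern)] + addition.
-- SUFFIX_GROUPS = [
--     [('iness', ['y']), ('iment', ['y']), ('iless', ['y']), ('ility', ['le'])],
--     [('ness', ['']), ('ment', ['']), ('like', ['']), ('less', ['']),
--      ('able', ['', 'e']), ('iful', ['y']), ('iest', ['y'])],
--     [('ing', ['', 'e'])],
--     [('ful', ['']), ('ist', ['']), ('est', ['']), ('ily', ['y'])],
--     [('es', ['']), ('al', ['']), ('ly', ['', 'e']), ('ed', ['', 'e']), ('er', ['', 'e'])],
--     [('s', [''])],
-- ]
--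
--
-- def _children(word):
--     out = []
--     for probe, pat in PREFIX_RULES:
--         if word[:probe] == pat:
--             out.append(word[probe:])
--             break
--     for group in SUFFIX_GROUPS:
--         for pat, adds in group:
--             if word[-len(pat):] == pat:
--                 for add in adds:
--                     out.append(word[:-len(pat)] + add)
--                 break
--     return out
--
--
-- def getlemmas(word):
--     stack = [word.lower()]
--     results = []
--     while stack:
--         w = stack.pop()
--         results.append(w)
--         for child in reversed(_children(w)):
--             stack.append(child)
--     return sorted(results, key=len)
-- ===== Notes on version B (the rewrite author's own statement) =====
-- stated objective: alternative
-- what changed: Replaces A's hard-coded recursive if/elif cascade (which re-sorts the lemma list at every recursive call) with a data-driven rule table interpreted by a generic first-match scanner, an explicit-stack pre-order worklist instead of recursion, and a single final stable length sort.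
import Mathlib
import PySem

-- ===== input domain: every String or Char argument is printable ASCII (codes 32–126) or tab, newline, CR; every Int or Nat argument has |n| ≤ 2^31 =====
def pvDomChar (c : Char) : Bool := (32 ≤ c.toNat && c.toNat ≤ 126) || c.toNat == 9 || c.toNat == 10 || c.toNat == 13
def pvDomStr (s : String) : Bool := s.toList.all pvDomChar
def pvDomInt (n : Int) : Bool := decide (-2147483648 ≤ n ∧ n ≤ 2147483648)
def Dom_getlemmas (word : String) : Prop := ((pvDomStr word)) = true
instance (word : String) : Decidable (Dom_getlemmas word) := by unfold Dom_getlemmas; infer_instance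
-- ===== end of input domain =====

-- B replaces A's hard-coded recursive if/elif cascade (which re-sorts at every level) by a
-- data-driven rule table interpreted by a generic first-match scanner, driven from an
-- explicit-stack worklist, with a single final stable length sort; same return value.

-- ===== PORT A =====
-- literal transliteration of A's recursion; the Nat fuel is a totality guard only
-- (every recursive call is on a strictly shorter word, so the seed word.length + 1 is never exhausted;
-- proved in the lemmas below via childrenB_mem / glA_main).
def glA : Nat → List Char → List (List Char)
  | 0, _ => []
  | fuel+1, w =>
    let word := PySem.Chars.lower w
    let lemmas : List (List Char) := [word]
    let prefix2 := PySem.List.slice word none (some 2)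
    let prefix3 := PySem.List.slice word none (some 3)
    let lemmas :=
      if prefix2 = ['r','e'] ∨ prefix2 = ['u','n'] ∨ prefix2 = ['i','n'] ∨ prefix2 = ['i','m'] ∨ prefix2 = ['d','i','s'] then
        lemmas ++ glA fuel (PySem.List.slice word (some 2) none)
      else if prefix3 = ['d','i','s'] then
        lemmas ++ glA fuel (PySem.List.slice word (some 3) none)
      else lemmas
    let suffix1 := PySem.List.slice word (some (-1)) none
    let suffix2 := PySem.List.slice word (some (-2)) none
    let suffix3 := PySem.List.slice word (some (-3)) none
    let suffix4 := PySem.List.slice word (some (-4)) none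
    let suffix5 := PySem.List.slice word (some (-5)) none
    let lemmas :=
      if suffix5 = ['i','n','e','s','s'] ∨ suffix5 = ['i','m','e','n','t'] ∨ suffix5 = ['i','l','e','s','s'] then
        lemmas ++ glA fuel (PySem.List.slice word none (some (-5)) ++ ['y'])
      else if suffix5 = ['i','l','i','t','y'] then
        lemmas ++ glA fuel (PySem.List.slice word none (some (-5)) ++ ['l','e'])
      else lemmas
    let lemmas :=
      if suffix4 = ['n','e','s','s'] ∨ suffix4 = ['m','e','n','t'] ∨ suffix4 = ['l','i','k','e'] ∨ suffix4 = ['l','e','s','s'] then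
        lemmas ++ glA fuel (PySem.List.slice word none (some (-4)))
      else if suffix4 = ['a','b','l','e'] then
        lemmas ++ glA fuel (PySem.List.slice word none (some (-4))) ++ glA fuel (PySem.List.slice word none (some (-4)) ++ ['e'])
      else if suffix4 = ['i','f','u','l'] ∨ suffix4 = ['i','e','s','t'] then
        lemmas ++ glA fuel (PySem.List.slice word none (some (-4)) ++ ['y'])
      else lemmas
    let lemmas :=
      if suffix3 = ['i','n','g'] then
        lemmas ++ glA fuel (PySem.List.slice word none (some (-3))) ++ glA fuel (PySem.List.slice word none (some (-3)) ++ ['e'])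
      else lemmas
    let lemmas :=
      if suffix3 = ['f','u','l'] ∨ suffix3 = ['i','s','t'] ∨ suffix3 = ['e','s','t'] then
        lemmas ++ glA fuel (PySem.List.slice word none (some (-3)))
      else if suffix3 = ['i','l','y'] then
        lemmas ++ glA fuel (PySem.List.slice word none (some (-3)) ++ ['y'])
      else lemmas
    let lemmas :=
      if suffix2 = ['e','s'] ∨ suffix2 = ['a','l'] then
        lemmas ++ glA fuel (PySem.List.slice word none (some (-2)))
      else if suffix2 = ['l','y'] ∨ suffix2 = ['e','d'] ∨ suffix2 = ['e','r'] then
        lemmas ++ glA fuel (PySem.List.slice word none (some (-2))) ++ glA fuel (PySem.List.slice word none (some (-2)) ++ ['e'])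
      else lemmas
    let lemmas :=
      if suffix1 = ['s'] then
        lemmas ++ glA fuel (PySem.List.slice word none (some (-1)))
      else lemmas
    PySem.List.sorted lemmas (fun l => l.length) false

def getlemmas (word : String) : List String :=
  (glA (word.toList.length + 1) word.toList).map String.ofList

-- ===== PORT B =====
-- Source B's PREFIX_RULES: (probe_length, pattern); first whose probe slice matches fires.
def prefixRules : List (Int × List Char) :=
  [(2, ['r','e']), (2, ['u','n']), (2, ['i','n']), (2, ['i','m']), (2, ['d','i','s']), (3, ['d','i','s'])]

-- Source B's SUFFIX_GROUPS: each group is scanned for its first matching pattern.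
def suffixGroups : List (List (List Char × List (List Char))) :=
  [ [(['i','n','e','s','s'], [['y']]), (['i','m','e','n','t'], [['y']]),
     (['i','l','e','s','s'], [['y']]), (['i','l','i','t','y'], [['l','e']])],
    [(['n','e','s','s'], [[]]), (['m','e','n','t'], [[]]), (['l','i','k','e'], [[]]),
     (['l','e','s','s'], [[]]), (['a','b','l','e'], [[], ['e']]),
     (['i','f','u','l'], [['y']]), (['i','e','s','t'], [['y']])],
    [(['i','n','g'], [[], ['e']])],
    [(['f','u','l'], [[]]), (['i','s','t'], [[]]), (['e','s','t'], [[]]), (['i','l','y'], [['y']])],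
    [(['e','s'], [[]]), (['a','l'], [[]]), (['l','y'], [[], ['e']]),
     (['e','d'], [[], ['e']]), (['e','r'], [[], ['e']])],
    [([('s':Char)], [[]])] ]

-- the 'for probe, pat in PREFIX_RULES: … break' loop: first matching rule yields word[probe:]
def firstPrefix : List (Int × List Char) → List Char → List (List Char)
  | [], _ => []
  | (probe, pat) :: rest, w =>
    if PySem.List.slice w none (some probe) = pat then [PySem.List.slice w (some probe) none]
    else firstPrefix rest w

-- the inner 'for pat, adds in group: … break' loop: first pattern with word[-len(pat):] == pat
-- yields word[:-len(pat)] + add for each add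
def firstSuffix : List (List Char × List (List Char)) → List Char → List (List Char)
  | [], _ => []
  | (pat, adds) :: rest, w =>
    if PySem.List.slice w (some (-(pat.length : Int))) none = pat then
      adds.map (fun add => PySem.List.slice w none (some (-(pat.length : Int))) ++ add)
    else firstSuffix rest w

-- Source B's _children: prefix scan, then each suffix group in order
def childrenB (w : List Char) : List (List Char) :=
  firstPrefix prefixRules w ++ suffixGroups.flatMap (fun g => firstSuffix g w)

-- Source B's while-stack loop; head of the list is the top of the stack, so pushing the reversed
-- child list is exactly prepending `childrenB w`.  The Nat fuel is a totality guard only: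
-- 15^(n+1) bounds the number of pops (proved below via preP_length_le / loopB_eq).
def loopB : Nat → List (List Char) → List (List Char) → List (List Char)
  | 0, _, acc => acc
  | _+1, [], acc => acc
  | fuel+1, w :: rest, acc => loopB fuel (childrenB w ++ rest) (acc ++ [w])

def getlemmas_alt (word : String) : List String :=
  let results := loopB (15 ^ (word.toList.length + 1)) [PySem.Chars.lower word.toList] []
  (PySem.List.sorted results (fun l => l.length) false).map String.ofList

-- ===== PRECONDITION & SPEC =====
def Spec_getlemmas (word : String) (out : List String) : Prop := out = getlemmas_alt word
instance (word : String) (out : List String) : Decidable (Spec_getlemmas word out) := by unfold Spec_getlemmas; infer_instance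

-- ===== CLAIM (what is proved, stated in full; the proofs are below) =====
def Claim_equal_getlemmas : Prop := ∀ (word : String), Dom_getlemmas word → Spec_getlemmas word (getlemmas word)

-- ===== LEMMAS AND PROOFS =====

-- abbreviations used only by the proofs
def Slen (l : List (List Char)) : List (List Char) := PySem.List.sorted l (fun x => x.length) false
def preP : Nat → List Char → List (List Char)
  | 0, _ => []
  | f+1, w => w :: (childrenB w).flatMap (preP f)
def preC (w : List Char) : List (List Char) := preP (w.length + 1) w

-- characters / lower
theorem char_le_toNat {c d : Char} (h : c ≤ d) : c.toNat ≤ d.toNat := by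
  rw [Char.le_def] at h
  exact UInt32.le_iff_toNat_le.mp h

theorem lowerChar_idem (c : Char) : PySem.Chars.lowerChar (PySem.Chars.lowerChar c) = PySem.Chars.lowerChar c := by
  unfold PySem.Chars.lowerChar PySem.Chars.isupper
  split_ifs with h1 h2 <;> try rfl
  exfalso
  simp only [Bool.and_eq_true, decide_eq_true_eq] at h1 h2
  have hb : c.toNat ≤ 90 := char_le_toNat h1.2
  have hval : (Char.ofNat (c.toNat + 32)).toNat = c.toNat + 32 := by
    rw [Char.toNat_ofNat, if_pos]
    left; omega
  have h2' := char_le_toNat h2.2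
  rw [hval] at h2'
  have h90 : (90:Nat) ≥ c.toNat + 32 := h2'
  have ha : 65 ≤ c.toNat := char_le_toNat h1.1
  omega

theorem lower_idem (w : List Char) : PySem.Chars.lower (PySem.Chars.lower w) = PySem.Chars.lower w := by
  simp [PySem.Chars.lower, Function.comp, lowerChar_idem]

theorem length_lower (w : List Char) : (PySem.Chars.lower w).length = w.length := by
  simp [PySem.Chars.lower]

theorem lower_take {w : List Char} (h : PySem.Chars.lower w = w) (k : Nat) :
    PySem.Chars.lower (w.take k) = w.take k := by
  conv_rhs => rw [← h]
  simp [PySem.Chars.lower, List.map_take]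

theorem lower_drop {w : List Char} (h : PySem.Chars.lower w = w) (k : Nat) :
    PySem.Chars.lower (w.drop k) = w.drop k := by
  conv_rhs => rw [← h]
  simp [PySem.Chars.lower, List.map_drop]

theorem lower_append (x y : List Char) :
    PySem.Chars.lower (x ++ y) = PySem.Chars.lower x ++ PySem.Chars.lower y := by
  simp [PySem.Chars.lower]

theorem lowlit_y : PySem.Chars.lower ['y'] = ['y'] := by decide
theorem lowlit_e : PySem.Chars.lower ['e'] = ['e'] := by decide
theorem lowlit_le : PySem.Chars.lower ['l','e'] = ['l','e'] := by decide

-- the elif chains of B's scanners, collapsed to the disjunctive conditions of A's if-chain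
theorem grpPre (w : List Char) : firstPrefix prefixRules w =
    (if PySem.List.slice w none (some 2) = ['r','e'] ∨ PySem.List.slice w none (some 2) = ['u','n'] ∨ PySem.List.slice w none (some 2) = ['i','n'] ∨ PySem.List.slice w none (some 2) = ['i','m'] ∨ PySem.List.slice w none (some 2) = ['d','i','s'] then [PySem.List.slice w (some 2) none] else if PySem.List.slice w none (some 3) = ['d','i','s'] then [PySem.List.slice w (some 3) none] else []) := by
  simp only [prefixRules, firstPrefix]
  split_ifs <;> simp_all

theorem grp5 (w : List Char) : firstSuffix [(['i','n','e','s','s'], [['y']]), (['i','m','e','n','t'], [['y']]), (['i','l','e','s','s'], [['y']]), (['i','l','i','t','y'], [['l','e']])] w =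
    (if PySem.List.slice w (some (-5)) none = ['i','n','e','s','s'] ∨ PySem.List.slice w (some (-5)) none = ['i','m','e','n','t'] ∨ PySem.List.slice w (some (-5)) none = ['i','l','e','s','s'] then [PySem.List.slice w none (some (-5)) ++ ['y']] else if PySem.List.slice w (some (-5)) none = ['i','l','i','t','y'] then [PySem.List.slice w none (some (-5)) ++ ['l','e']] else []) := by
  simp only [firstSuffix, List.length_cons, List.length_nil, List.map_cons, List.map_nil]
  norm_num
  split_ifs <;> simp_all

theorem grp4 (w : List Char) : firstSuffix [(['n','e','s','s'], [[]]), (['m','e','n','t'], [[]]), (['l','i','k','e'], [[]]), (['l','e','s','s'], [[]]), (['a','b','l','e'], [[], ['e']]), (['i','f','u','l'], [['y']]), (['i','e','s','t'], [['y']])] w =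
    (if PySem.List.slice w (some (-4)) none = ['n','e','s','s'] ∨ PySem.List.slice w (some (-4)) none = ['m','e','n','t'] ∨ PySem.List.slice w (some (-4)) none = ['l','i','k','e'] ∨ PySem.List.slice w (some (-4)) none = ['l','e','s','s'] then [PySem.List.slice w none (some (-4))] else if PySem.List.slice w (some (-4)) none = ['a','b','l','e'] then [PySem.List.slice w none (some (-4)), PySem.List.slice w none (some (-4)) ++ ['e']] else if PySem.List.slice w (some (-4)) none = ['i','f','u','l'] ∨ PySem.List.slice w (some (-4)) none = ['i','e','s','t'] then [PySem.List.slice w none (some (-4)) ++ ['y']] else []) := by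
  simp only [firstSuffix, List.length_cons, List.length_nil, List.map_cons, List.map_nil, List.append_nil]
  norm_num
  split_ifs <;> simp_all

theorem grp3a (w : List Char) : firstSuffix [(['i','n','g'], [[], ['e']])] w =
    (if PySem.List.slice w (some (-3)) none = ['i','n','g'] then [PySem.List.slice w none (some (-3)), PySem.List.slice w none (some (-3)) ++ ['e']] else []) := by
  simp only [firstSuffix, List.length_cons, List.length_nil, List.map_cons, List.map_nil, List.append_nil]
  norm_num

theorem grp3b (w : List Char) : firstSuffix [(['f','u','l'], [[]]), (['i','s','t'], [[]]), (['e','s','t'], [[]]), (['i','l','y'], [['y']])] w =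
    (if PySem.List.slice w (some (-3)) none = ['f','u','l'] ∨ PySem.List.slice w (some (-3)) none = ['i','s','t'] ∨ PySem.List.slice w (some (-3)) none = ['e','s','t'] then [PySem.List.slice w none (some (-3))] else if PySem.List.slice w (some (-3)) none = ['i','l','y'] then [PySem.List.slice w none (some (-3)) ++ ['y']] else []) := by
  simp only [firstSuffix, List.length_cons, List.length_nil, List.map_cons, List.map_nil, List.append_nil]
  norm_num
  split_ifs <;> simp_all

theorem grp2 (w : List Char) : firstSuffix [(['e','s'], [[]]), (['a','l'], [[]]), (['l','y'], [[], ['e']]), (['e','d'], [[], ['e']]), (['e','r'], [[], ['e']])] w =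
    (if PySem.List.slice w (some (-2)) none = ['e','s'] ∨ PySem.List.slice w (some (-2)) none = ['a','l'] then [PySem.List.slice w none (some (-2))] else if PySem.List.slice w (some (-2)) none = ['l','y'] ∨ PySem.List.slice w (some (-2)) none = ['e','d'] ∨ PySem.List.slice w (some (-2)) none = ['e','r'] then [PySem.List.slice w none (some (-2)), PySem.List.slice w none (some (-2)) ++ ['e']] else []) := by
  simp only [firstSuffix, List.length_cons, List.length_nil, List.map_cons, List.map_nil, List.append_nil]
  norm_num
  split_ifs <;> simp_all

theorem grp1 (w : List Char) : firstSuffix [([('s':Char)], [[]])] w =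
    (if PySem.List.slice w (some (-1)) none = ['s'] then [PySem.List.slice w none (some (-1))] else []) := by
  simp only [firstSuffix, List.length_cons, List.length_nil, List.map_cons, List.map_nil, List.append_nil]
  norm_num

theorem childrenB_decomp (w : List Char) : childrenB w =
    (if PySem.List.slice w none (some 2) = ['r','e'] ∨ PySem.List.slice w none (some 2) = ['u','n'] ∨ PySem.List.slice w none (some 2) = ['i','n'] ∨ PySem.List.slice w none (some 2) = ['i','m'] ∨ PySem.List.slice w none (some 2) = ['d','i','s'] then [PySem.List.slice w (some 2) none] else if PySem.List.slice w none (some 3) = ['d','i','s'] then [PySem.List.slice w (some 3) none] else [])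
    ++ (if PySem.List.slice w (some (-5)) none = ['i','n','e','s','s'] ∨ PySem.List.slice w (some (-5)) none = ['i','m','e','n','t'] ∨ PySem.List.slice w (some (-5)) none = ['i','l','e','s','s'] then [PySem.List.slice w none (some (-5)) ++ ['y']] else if PySem.List.slice w (some (-5)) none = ['i','l','i','t','y'] then [PySem.List.slice w none (some (-5)) ++ ['l','e']] else [])
    ++ (if PySem.List.slice w (some (-4)) none = ['n','e','s','s'] ∨ PySem.List.slice w (some (-4)) none = ['m','e','n','t'] ∨ PySem.List.slice w (some (-4)) none = ['l','i','k','e'] ∨ PySem.List.slice w (some (-4)) none = ['l','e','s','s'] then [PySem.List.slice w none (some (-4))] else if PySem.List.slice w (some (-4)) none = ['a','b','l','e'] then [PySem.List.slice w none (some (-4)), PySem.List.slice w none (some (-4)) ++ ['e']] else if PySem.List.slice w (some (-4)) none = ['i','f','u','l'] ∨ PySem.List.slice w (some (-4)) none = ['i','e','s','t'] then [PySem.List.slice w none (some (-4)) ++ ['y']] else [])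
    ++ (if PySem.List.slice w (some (-3)) none = ['i','n','g'] then [PySem.List.slice w none (some (-3)), PySem.List.slice w none (some (-3)) ++ ['e']] else [])
    ++ (if PySem.List.slice w (some (-3)) none = ['f','u','l'] ∨ PySem.List.slice w (some (-3)) none = ['i','s','t'] ∨ PySem.List.slice w (some (-3)) none = ['e','s','t'] then [PySem.List.slice w none (some (-3))] else if PySem.List.slice w (some (-3)) none = ['i','l','y'] then [PySem.List.slice w none (some (-3)) ++ ['y']] else [])
    ++ (if PySem.List.slice w (some (-2)) none = ['e','s'] ∨ PySem.List.slice w (some (-2)) none = ['a','l'] then [PySem.List.slice w none (some (-2))] else if PySem.List.slice w (some (-2)) none = ['l','y'] ∨ PySem.List.slice w (some (-2)) none = ['e','d'] ∨ PySem.List.slice w (some (-2)) none = ['e','r'] then [PySem.List.slice w none (some (-2)), PySem.List.slice w none (some (-2)) ++ ['e']] else [])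
    ++ (if PySem.List.slice w (some (-1)) none = ['s'] then [PySem.List.slice w none (some (-1))] else []) := by
  simp only [childrenB, suffixGroups, List.flatMap_cons, List.flatMap_nil]
  rw [grpPre, grp5, grp4, grp3a, grp3b, grp2, grp1]
  simp only [List.append_assoc, List.append_nil]

theorem childrenB_mem {w c : List Char} (h : c ∈ childrenB w) :
    c.length < w.length ∧ (PySem.Chars.lower w = w → PySem.Chars.lower c = c) := by
  rw [childrenB_decomp] at h
  rw [PySem.List.slice_from_neg_ofNat w 5 (by norm_num), PySem.List.slice_to_neg_ofNat w 5 (by norm_num),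
      PySem.List.slice_from_neg_ofNat w 4 (by norm_num), PySem.List.slice_to_neg_ofNat w 4 (by norm_num),
      PySem.List.slice_from_neg_ofNat w 3 (by norm_num), PySem.List.slice_to_neg_ofNat w 3 (by norm_num),
      PySem.List.slice_from_neg_ofNat w 2 (by norm_num), PySem.List.slice_to_neg_ofNat w 2 (by norm_num),
      PySem.List.slice_from_neg_one w, PySem.List.slice_to_neg_one w, List.dropLast_eq_take,
      PySem.List.slice_to w (by norm_num : (0:Int) ≤ 2), PySem.List.slice_to w (by norm_num : (0:Int) ≤ 3),
      PySem.List.slice_from w (by norm_num : (0:Int) ≤ 2), PySem.List.slice_from w (by norm_num : (0:Int) ≤ 3),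
      show (2:Int).toNat = 2 from rfl, show (3:Int).toNat = 3 from rfl] at h
  norm_num [List.mem_append] at h
  obtain h|h|h|h|h|h|h := h
  -- prefixes
  · split_ifs at h with hA hB <;> simp only [List.mem_cons, List.not_mem_nil, or_false] at h <;> subst h
    · have hn : 2 ≤ w.length := by
        rcases hA with hA|hA|hA|hA|hA <;>
          (have := congrArg List.length hA; simp [List.length_take] at this; omega)
      exact ⟨by simp [List.length_drop]; omega, fun hl => lower_drop hl 2⟩
    · have hn : 3 ≤ w.length := by
        have := congrArg List.length hB; simp [List.length_take] at this; omega
      exact ⟨by simp [List.length_drop]; omega, fun hl => lower_drop hl 3⟩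
  -- suffix5
  · split_ifs at h with hA hB <;> simp only [List.mem_cons, List.not_mem_nil, or_false] at h <;> subst h
    · have hn : 5 ≤ w.length := by
        rcases hA with hA|hA|hA <;>
          (have := congrArg List.length hA; simp [List.length_drop] at this; omega)
      refine ⟨by simp [List.length_take]; omega, fun hl => ?_⟩
      rw [lower_append, lower_take hl, lowlit_y]
    · have hn : 5 ≤ w.length := by
        have := congrArg List.length hB; simp [List.length_drop] at this; omega
      refine ⟨by simp [List.length_take]; omega, fun hl => ?_⟩
      rw [lower_append, lower_take hl, lowlit_le]
  -- suffix4
  · split_ifs at h with hA hB hC <;> simp only [List.mem_cons, List.not_mem_nil, or_false] at h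
    · subst h
      have hn : 4 ≤ w.length := by
        rcases hA with hA|hA|hA|hA <;>
          (have := congrArg List.length hA; simp [List.length_drop] at this; omega)
      exact ⟨by simp [List.length_take]; omega, fun hl => lower_take hl _⟩
    · have hn : 4 ≤ w.length := by
        have := congrArg List.length hB; simp [List.length_drop] at this; omega
      obtain h|h := h <;> subst h
      · exact ⟨by simp [List.length_take]; omega, fun hl => lower_take hl _⟩
      · refine ⟨by simp [List.length_take]; omega, fun hl => ?_⟩
        rw [lower_append, lower_take hl, lowlit_e]
    · subst h
      have hn : 4 ≤ w.length := by
        rcases hC with hC|hC <;>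
          (have := congrArg List.length hC; simp [List.length_drop] at this; omega)
      refine ⟨by simp [List.length_take]; omega, fun hl => ?_⟩
      rw [lower_append, lower_take hl, lowlit_y]
  -- ing
  · obtain ⟨hA, h⟩ := h
    have hn : 3 ≤ w.length := by
      have := congrArg List.length hA; simp [List.length_drop] at this; omega
    obtain h|h := h <;> subst h
    · exact ⟨by simp [List.length_take]; omega, fun hl => lower_take hl _⟩
    · refine ⟨by simp [List.length_take]; omega, fun hl => ?_⟩
      rw [lower_append, lower_take hl, lowlit_e]
  -- ful/ist/est/ily
  · split_ifs at h with hA hB <;> simp only [List.mem_cons, List.not_mem_nil, or_false] at h <;> subst h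
    · have hn : 3 ≤ w.length := by
        rcases hA with hA|hA|hA <;>
          (have := congrArg List.length hA; simp [List.length_drop] at this; omega)
      exact ⟨by simp [List.length_take]; omega, fun hl => lower_take hl _⟩
    · have hn : 3 ≤ w.length := by
        have := congrArg List.length hB; simp [List.length_drop] at this; omega
      refine ⟨by simp [List.length_take]; omega, fun hl => ?_⟩
      rw [lower_append, lower_take hl, lowlit_y]
  -- es/al/ly/ed/er
  · split_ifs at h with hA hB <;> simp only [List.mem_cons, List.not_mem_nil, or_false] at h
    · subst h
      have hn : 2 ≤ w.length := by
        rcases hA with hA|hA <;>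
          (have := congrArg List.length hA; simp [List.length_drop] at this; omega)
      exact ⟨by simp [List.length_take]; omega, fun hl => lower_take hl _⟩
    · have hn : 2 ≤ w.length := by
        rcases hB with hB|hB|hB <;>
          (have := congrArg List.length hB; simp [List.length_drop] at this; omega)
      obtain h|h := h <;> subst h
      · exact ⟨by simp [List.length_take]; omega, fun hl => lower_take hl _⟩
      · refine ⟨by simp [List.length_take]; omega, fun hl => ?_⟩
        rw [lower_append, lower_take hl, lowlit_e]
  -- s
  · obtain ⟨hA, h⟩ := h
    subst h
    have hn : 1 ≤ w.length := by
      have := congrArg List.length hA; simp [List.length_drop] at this; omega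
    exact ⟨by simp [List.length_take]; omega, fun hl => lower_take hl _⟩

theorem iflen1 {α : Type} {c1 : Prop} [Decidable c1] {a : List α} (ha : a.length ≤ 2) :
    (if c1 then a else ([] : List α)).length ≤ 2 := by split_ifs <;> simp_all
theorem iflen2 {α : Type} {c1 c2 : Prop} [Decidable c1] [Decidable c2] {a b : List α}
    (ha : a.length ≤ 2) (hb : b.length ≤ 2) :
    (if c1 then a else if c2 then b else ([] : List α)).length ≤ 2 := by split_ifs <;> simp_all
theorem iflen3 {α : Type} {c1 c2 c3 : Prop} [Decidable c1] [Decidable c2] [Decidable c3] {a b d : List α}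
    (ha : a.length ≤ 2) (hb : b.length ≤ 2) (hd : d.length ≤ 2) :
    (if c1 then a else if c2 then b else if c3 then d else ([] : List α)).length ≤ 2 := by
  split_ifs <;> simp_all

theorem childrenB_length_le (w : List Char) : (childrenB w).length ≤ 14 := by
  rw [childrenB_decomp]
  simp only [List.length_append]
  refine le_trans ?_ (by norm_num : (2+2+2+2+2+2+2:Nat) ≤ 14)
  gcongr <;>
    first
      | exact iflen1 (by simp)
      | exact iflen2 (by simp) (by simp)
      | exact iflen3 (by simp) (by simp) (by simp)

theorem preP_stable : ∀ (f : Nat) (w : List Char), w.length < f → preP f w = preC w := by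
  intro f
  induction f using Nat.strong_induction_on with
  | _ f ih =>
    intro w hf
    match f, hf with
    | f'+1, hf =>
      show preP (f'+1) w = preP (w.length+1) w
      simp only [preP]
      congr 1
      apply List.flatMap_congr
      intro c hc
      have hlt := (childrenB_mem hc).1
      have h1 : preP f' c = preC c := ih f' (Nat.lt_succ_self f') c (by omega)
      have h2 : preP w.length c = preC c := ih w.length hf c hlt
      rw [h1, h2]

theorem preC_eq (w : List Char) : preC w = w :: (childrenB w).flatMap preC := by
  show preP (w.length+1) w = _
  simp only [preP]
  congr 1
  apply List.flatMap_congr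
  intro c hc
  exact preP_stable w.length c (childrenB_mem hc).1

theorem preP_length_le : ∀ (f : Nat) (w : List Char), (preP f w).length ≤ 15 ^ f := by
  intro f
  induction f with
  | zero => intro w; simp [preP]
  | succ f ih =>
    intro w
    simp only [preP, List.length_cons, List.length_flatMap]
    have hsum : ((childrenB w).map (fun c => (preP f c).length)).sum ≤ (childrenB w).length * 15 ^ f := by
      have := List.sum_le_card_nsmul ((childrenB w).map (fun c => (preP f c).length)) (15 ^ f) ?_
      · simpa [smul_eq_mul] using this
      · intro x hx
        simp only [List.mem_map] at hx
        obtain ⟨c, _, rfl⟩ := hx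
        exact ih c
    have hcard := childrenB_length_le w
    have : (childrenB w).length * 15 ^ f ≤ 14 * 15 ^ f := by
      exact Nat.mul_le_mul_right _ hcard
    have hpow : 15 ^ (f+1) = 15 * 15 ^ f := by ring
    have hdpos : 0 < 15 ^ f := Nat.pow_pos (by norm_num)
    omega

theorem loopB_eq : ∀ (f : Nat) (stack acc : List (List Char)),
    (stack.map (fun w => (preC w).length)).sum ≤ f →
    loopB f stack acc = acc ++ stack.flatMap preC := by
  intro f
  induction f with
  | zero =>
    intro stack acc h
    cases stack with
    | nil => simp [loopB]
    | cons w rest =>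
      exfalso
      have : 1 ≤ (preC w).length := by rw [preC_eq]; simp
      simp only [List.map_cons, List.sum_cons] at h
      omega
  | succ f ih =>
    intro stack acc h
    cases stack with
    | nil => simp [loopB]
    | cons w rest =>
      show loopB f (childrenB w ++ rest) (acc ++ [w]) = _
      rw [ih]
      · rw [List.flatMap_cons, List.flatMap_append]
        simp [preC_eq w, List.append_assoc]
      · have hw : (preC w).length = 1 + ((childrenB w).map (fun c => (preC c).length)).sum := by
          rw [preC_eq]; simp [List.length_flatMap]
          omega
        simp only [List.map_cons, List.sum_cons, List.map_append, List.sum_append] at h ⊢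
        omega

theorem insertBy_cons {α : Type} (before : α → α → Bool) (x y : α) (ys : List α) :
    PySem.List.insertBy before x (y :: ys)
      = if before x y then x :: y :: ys else y :: PySem.List.insertBy before x ys := rfl

theorem filter_insertBy (k : Nat) (x : List Char) :
    ∀ (acc : List (List Char)), acc.Pairwise (fun a b => a.length ≤ b.length) →
    (PySem.List.insertBy (fun a b => decide (a.length < b.length)) x acc).filter (fun y => y.length == k)
      = acc.filter (fun y => y.length == k) ++ if x.length == k then [x] else [] := by
  intro acc
  induction acc with
  | nil =>
    intro _
    show List.filter _ [x] = _
    by_cases hk : x.length = k <;> simp [hk]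
  | cons y ys ih =>
    intro hp
    rw [insertBy_cons]
    by_cases hlt : x.length < y.length
    · rw [if_pos (by simpa using hlt)]
      by_cases hk : x.length = k
      · have hnil : (y :: ys).filter (fun z => z.length == k) = [] := by
          rw [List.filter_eq_nil_iff]
          intro z hz
          have hyz : y.length ≤ z.length := by
            rcases List.mem_cons.mp hz with rfl | hz'
            · exact le_refl _
            · exact (List.pairwise_cons.mp hp).1 z hz'
          simp only [beq_iff_eq]
          omega
        rw [List.filter_cons_of_pos (by simp [hk]), hnil, if_pos (by simp [hk])]
        simp
      · rw [List.filter_cons_of_neg (by simp [hk]), if_neg (by simp [hk])]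
        simp
    · rw [if_neg (by simpa using hlt)]
      have hys := (List.pairwise_cons.mp hp).2
      by_cases hy : y.length = k
      · rw [List.filter_cons_of_pos (by simp [hy]), List.filter_cons_of_pos (by simp [hy]),
            ih hys, List.cons_append]
      · rw [List.filter_cons_of_neg (by simp [hy]), List.filter_cons_of_neg (by simp [hy]), ih hys]

theorem Slen_append_singleton (l : List (List Char)) (x : List Char) :
    Slen (l ++ [x]) = PySem.List.insertBy (fun a b => decide (a.length < b.length)) x (Slen l) := by
  unfold Slen
  rw [PySem.List.sorted_eq_foldl_insertBy, PySem.List.sorted_eq_foldl_insertBy, List.foldl_append]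
  simp

theorem Slen_pairwise (l : List (List Char)) :
    (Slen l).Pairwise (fun a b => a.length ≤ b.length) := PySem.List.sorted_pairwise l _

theorem filter_Slen (k : Nat) (l : List (List Char)) :
    (Slen l).filter (fun y => y.length == k) = l.filter (fun y => y.length == k) := by
  induction l using List.reverseRecOn with
  | nil => rfl
  | append_singleton l x ih =>
    rw [Slen_append_singleton, filter_insertBy k x (Slen l) (Slen_pairwise l), ih, List.filter_append]
    congr 1
    by_cases hk : x.length = k <;> simp [hk]

theorem sorted_unique : ∀ (p q : List (List Char)),
    p.Pairwise (fun a b => a.length ≤ b.length) → q.Pairwise (fun a b => a.length ≤ b.length) →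
    (∀ k : Nat, p.filter (fun y => y.length == k) = q.filter (fun y => y.length == k)) → p = q := by
  intro p
  induction p with
  | nil =>
    intro q _ _ hf
    cases q with
    | nil => rfl
    | cons b q' =>
      exfalso
      have := hf b.length
      rw [List.filter_nil, List.filter_cons_of_pos (by simp)] at this
      simp at this
  | cons a p' ih =>
    intro q hp hq hf
    cases q with
    | nil =>
      exfalso
      have := hf a.length
      rw [List.filter_nil, List.filter_cons_of_pos (by simp)] at this
      simp at this
    | cons b q' =>
      have hab : a = b := by
        by_cases hk : a.length = b.length
        · have := hf a.length
          rw [List.filter_cons_of_pos (by simp), List.filter_cons_of_pos (by simp [hk])] at this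
          exact (List.cons.injEq _ _ _ _ ▸ this).1
        · exfalso
          have h1 := hf a.length
          rw [List.filter_cons_of_pos (by simp), List.filter_cons_of_neg (by simp; omega)] at h1
          have hex1 : ∃ z ∈ q', z.length = a.length := by
            have : a ∈ q'.filter (fun y => y.length == a.length) := by rw [← h1]; simp
            exact ⟨a, (List.mem_filter.mp this).1, by simp⟩
          obtain ⟨z, hz, hzl⟩ := hex1
          have hbz : b.length ≤ z.length := (List.pairwise_cons.mp hq).1 z hz
          have h2 := hf b.length
          rw [List.filter_cons_of_neg (by simp; omega), List.filter_cons_of_pos (by simp)] at h2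
          have hex2 : ∃ z ∈ p', z.length = b.length := by
            have : b ∈ p'.filter (fun y => y.length == b.length) := by rw [h2]; simp
            exact ⟨b, (List.mem_filter.mp this).1, by simp⟩
          obtain ⟨z', hz', hzl'⟩ := hex2
          have haz : a.length ≤ z'.length := (List.pairwise_cons.mp hp).1 z' hz'
          omega
      subst hab
      have htail : ∀ k : Nat, p'.filter (fun y => y.length == k) = q'.filter (fun y => y.length == k) := by
        intro k
        have := hf k
        by_cases hk : a.length = k
        · rw [List.filter_cons_of_pos (by simp [hk]), List.filter_cons_of_pos (by simp [hk])] at this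
          exact (List.cons.injEq _ _ _ _ ▸ this).2
        · rwa [List.filter_cons_of_neg (by simp [hk]), List.filter_cons_of_neg (by simp [hk])] at this
      exact congrArg (a :: ·) (ih q' (List.pairwise_cons.mp hp).2 (List.pairwise_cons.mp hq).2 htail)

theorem Slen_stab (a b c : List (List Char)) : Slen (a ++ Slen b ++ c) = Slen (a ++ b ++ c) := by
  apply sorted_unique _ _ (Slen_pairwise _) (Slen_pairwise _)
  intro k
  rw [filter_Slen, filter_Slen]
  simp only [List.filter_append, filter_Slen]

theorem Slen_chain (F G : List Char → List (List Char)) :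
    ∀ (cs : List (List Char)) (pre : List (List Char)), (∀ c ∈ cs, F c = Slen (G c)) →
    Slen (pre ++ cs.flatMap F) = Slen (pre ++ cs.flatMap G) := by
  intro cs
  induction cs with
  | nil => intro pre _; rfl
  | cons x cs ih =>
    intro pre hc
    rw [List.flatMap_cons, List.flatMap_cons, hc x (by simp)]
    have h1 : Slen (pre ++ (Slen (G x) ++ cs.flatMap F)) = Slen (pre ++ Slen (G x) ++ cs.flatMap F) := by
      rw [List.append_assoc]
    rw [h1, Slen_stab, List.append_assoc, ← List.append_assoc pre (G x) _,
        ih (pre ++ G x) (fun c h => hc c (by simp [h])), List.append_assoc]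

theorem ext1 {α β : Type} (c1 : Prop) [Decidable c1] (l : List α) (f : β → List α) (x : β) :
    (if c1 then l ++ f x else l) = l ++ (if c1 then [x] else []).flatMap f := by
  split_ifs <;> simp
theorem ext1two {α β : Type} (c1 : Prop) [Decidable c1] (l : List α) (f : β → List α) (x y : β) :
    (if c1 then l ++ f x ++ f y else l) = l ++ (if c1 then [x, y] else []).flatMap f := by
  split_ifs <;> simp [List.append_assoc]
theorem ext2 {α β : Type} (c1 c2 : Prop) [Decidable c1] [Decidable c2] (l : List α) (f : β → List α) (x y : β) :
    (if c1 then l ++ f x else if c2 then l ++ f y else l) = l ++ (if c1 then [x] else if c2 then [y] else []).flatMap f := by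
  split_ifs <;> simp
theorem ext2two {α β : Type} (c1 c2 : Prop) [Decidable c1] [Decidable c2] (l : List α) (f : β → List α) (x y y' : β) :
    (if c1 then l ++ f x else if c2 then l ++ f y ++ f y' else l) = l ++ (if c1 then [x] else if c2 then [y, y'] else []).flatMap f := by
  split_ifs <;> simp [List.append_assoc]
theorem ext3 {α β : Type} (c1 c2 c3 : Prop) [Decidable c1] [Decidable c2] [Decidable c3] (l : List α) (f : β → List α) (x y y' z : β) :
    (if c1 then l ++ f x else if c2 then l ++ f y ++ f y' else if c3 then l ++ f z else l)
      = l ++ (if c1 then [x] else if c2 then [y, y'] else if c3 then [z] else []).flatMap f := by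
  split_ifs <;> simp [List.append_assoc]

theorem glA_succ (f : Nat) (w : List Char) :
    glA (f+1) w = Slen (PySem.Chars.lower w :: (childrenB (PySem.Chars.lower w)).flatMap (glA f)) := by
  simp only [glA]
  rw [ext1 _ _ (glA f) (PySem.List.slice (PySem.Chars.lower w) none (some (-1)))]
  rw [ext2two _ _ _ (glA f) (PySem.List.slice (PySem.Chars.lower w) none (some (-2)))
      (PySem.List.slice (PySem.Chars.lower w) none (some (-2)))
      (PySem.List.slice (PySem.Chars.lower w) none (some (-2)) ++ ['e'])]
  rw [ext2 _ _ _ (glA f) (PySem.List.slice (PySem.Chars.lower w) none (some (-3)))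
      (PySem.List.slice (PySem.Chars.lower w) none (some (-3)) ++ ['y'])]
  rw [ext1two _ _ (glA f) (PySem.List.slice (PySem.Chars.lower w) none (some (-3)))
      (PySem.List.slice (PySem.Chars.lower w) none (some (-3)) ++ ['e'])]
  rw [ext3 _ _ _ _ (glA f) (PySem.List.slice (PySem.Chars.lower w) none (some (-4)))
      (PySem.List.slice (PySem.Chars.lower w) none (some (-4)))
      (PySem.List.slice (PySem.Chars.lower w) none (some (-4)) ++ ['e'])
      (PySem.List.slice (PySem.Chars.lower w) none (some (-4)) ++ ['y'])]
  rw [ext2 _ _ _ (glA f) (PySem.List.slice (PySem.Chars.lower w) none (some (-5)) ++ ['y'])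
      (PySem.List.slice (PySem.Chars.lower w) none (some (-5)) ++ ['l','e'])]
  rw [ext2 _ _ _ (glA f) (PySem.List.slice (PySem.Chars.lower w) (some 2) none)
      (PySem.List.slice (PySem.Chars.lower w) (some 3) none)]
  rw [childrenB_decomp]
  simp only [List.flatMap_append, List.append_assoc, List.nil_append, List.cons_append, Slen]

theorem glA_main : ∀ (f : Nat) (w : List Char), PySem.Chars.lower w = w → w.length < f →
    glA f w = Slen (preC w) := by
  intro f
  induction f using Nat.strong_induction_on with
  | _ f ih =>
    intro w hlow hf
    match f, hf with
    | f'+1, hf =>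
      rw [glA_succ, hlow, preC_eq w]
      have h1 : Slen ([w] ++ (childrenB w).flatMap (glA f')) = Slen ([w] ++ (childrenB w).flatMap preC) := by
        apply Slen_chain
        intro c hc
        have hm := childrenB_mem hc
        exact ih f' (Nat.lt_succ_self f') c (hm.2 hlow) (by omega)
      simpa using h1

-- ===== VERDICT =====
theorem getlemmas_spec : Claim_equal_getlemmas := by
  intro word _
  unfold Spec_getlemmas getlemmas getlemmas_alt
  have hA : glA (word.toList.length + 1) word.toList
      = Slen (preC (PySem.Chars.lower word.toList)) := by
    rw [glA_succ]
    have h2 := glA_main (word.toList.length + 1) (PySem.Chars.lower word.toList)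
      (lower_idem _) (by rw [length_lower]; omega)
    rw [glA_succ, lower_idem] at h2
    exact h2
  have hB : loopB (15 ^ (word.toList.length + 1)) [PySem.Chars.lower word.toList] []
      = preC (PySem.Chars.lower word.toList) := by
    rw [loopB_eq]
    · simp
    · simp only [List.map_cons, List.map_nil, List.sum_cons, List.sum_nil, Nat.add_zero]
      unfold preC
      rw [length_lower]
      exact preP_length_le _ _
  rw [hA, hB]
  rfl
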